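-- pv_equiv track=rewrite | github.com/triplealfa/Beta-Cards | beta_cards.py | remap_entry_ids
-- ===== SOURCE A (Python) =====
-- from typing import Dict, List, Optional
--
-- def remap_entry_ids(
--
--     entries: Dict[str, int],
--     old_ids: List[str],
--     new_id: str,
-- ) -> Dict[str, int]:
--     if not old_ids:
--         return dict(entries)
--     remapped = dict(entries)
--     total_quantity = 0
--     for old_id in old_ids:
--         if old_id == new_id:
--             continue
--         total_quantity += remapped.pop(old_id, 0)
--     if total_quantity:
--         remapped[new_id] = remapped.get(new_id, 0) + total_quantity
--     return remapped
-- ===== SOURCE B (Python) =====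
-- from typing import Dict, List
--
--
-- def remap_entry_ids(
--     entries: Dict[str, int],
--     old_ids: List[str],
--     new_id: str,
-- ) -> Dict[str, int]:
--     # Staged, mutation-free: filter out the old ids, sum what was removed,
--     # then merge the total into new_id's slot (update in place or append).
--     old_set = set(old_ids) - {new_id}
--     kept = [(k, v) for k, v in entries.items() if k not in old_set]
--     total = sum(v for k, v in entries.items() if k in old_set)
--     if not total:
--         return dict(kept)
--     if any(k == new_id for k, _ in kept):
--         return {k: (v + total if k == new_id else v) for k, v in kept}
--     return dict(kept + [(new_id, total)])
-- ===== Notes on version B (the rewrite author's own statement) =====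
-- stated objective: alternative
-- what changed: A copies the dict and pops each old id one by one, mutating the copy; B is mutation-free and staged: it filters the surviving entries, sums the removed quantities in a second comprehension, and merges the total into new_id's slot by a pure map-update or a list append.
import Mathlib
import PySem

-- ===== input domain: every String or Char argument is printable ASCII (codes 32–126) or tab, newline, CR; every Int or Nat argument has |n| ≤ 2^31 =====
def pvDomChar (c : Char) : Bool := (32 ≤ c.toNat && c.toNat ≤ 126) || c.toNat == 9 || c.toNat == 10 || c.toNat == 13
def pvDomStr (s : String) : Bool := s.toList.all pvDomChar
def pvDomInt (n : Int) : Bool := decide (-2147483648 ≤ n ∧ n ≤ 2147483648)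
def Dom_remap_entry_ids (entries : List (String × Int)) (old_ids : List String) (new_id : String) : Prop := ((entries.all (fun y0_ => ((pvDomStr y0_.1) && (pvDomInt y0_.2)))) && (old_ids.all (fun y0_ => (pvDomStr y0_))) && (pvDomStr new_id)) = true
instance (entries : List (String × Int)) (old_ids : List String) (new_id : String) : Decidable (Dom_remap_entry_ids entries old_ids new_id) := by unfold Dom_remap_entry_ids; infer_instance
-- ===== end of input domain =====

-- B replaces A's copy-then-pop-each-old-id mutation loop by staged, mutation-free passes
-- (filter the kept entries, sum the removed quantities, merge the total by map-update or
-- append); alternative structure, same results.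


-- ===== PORT A =====
def remap_entry_ids (entries : List (String × Int)) (old_ids : List String) (new_id : String) : List (String × Int) :=
  if old_ids = [] then (PySem.Dict.ofList entries).items
  else
    let st := old_ids.foldl (fun (st : PySem.Dict String Int × Int) old_id =>
      if old_id = new_id then st
      else
        match st.1.pop? old_id with
        | some r => (r.2, st.2 + r.1)
        | none => (st.1, st.2 + 0)) (PySem.Dict.ofList entries, 0)
    if st.2 ≠ 0 then (st.1.insert new_id (st.1.getD new_id 0 + st.2)).items
    else st.1.items

-- ===== PORT B =====
def remap_entry_ids_alt (entries : List (String × Int)) (old_ids : List String) (new_id : String) : List (String × Int) :=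
  let old_set : PySem.Set String := PySem.Set.diff (PySem.Set.ofList old_ids) (PySem.Set.ofList [new_id])
  let items := (PySem.Dict.ofList entries).items
  let kept := items.filter (fun p => !old_set.contains p.1)
  let total := ((items.filter (fun p => old_set.contains p.1)).map Prod.snd).sum
  if total = 0 then kept
  else if kept.any (fun p => p.1 == new_id) then
    kept.map (fun p => if p.1 == new_id then (p.1, p.2 + total) else p)
  else kept ++ [(new_id, total)]

-- ===== PRECONDITION & SPEC =====
def Spec_remap_entry_ids (entries : List (String × Int)) (old_ids : List String) (new_id : String) (out : List (String × Int)) : Prop := out = remap_entry_ids_alt entries old_ids new_id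
instance (entries : List (String × Int)) (old_ids : List String) (new_id : String) (out : List (String × Int)) : Decidable (Spec_remap_entry_ids entries old_ids new_id out) := by unfold Spec_remap_entry_ids; infer_instance

-- ===== CLAIM (what is proved, stated in full; the proofs are below) =====
def Claim_equal_remap_entry_ids : Prop := ∀ (entries : List (String × Int)) (old_ids : List String) (new_id : String), Dom_remap_entry_ids entries old_ids new_id → Spec_remap_entry_ids entries old_ids new_id (remap_entry_ids entries old_ids new_id)

-- ===== LEMMAS AND PROOFS =====

-- sum over the filtered values splits off the unique item with key x
theorem pv_sum_filter_or (l : List (String × Int)) (x : String) (v : Int)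
    (r : (String × Int) → Bool) (hnd : (l.map Prod.fst).Nodup) (hmem : (x, v) ∈ l) :
    ((l.filter (fun p => (p.1 == x) || r p)).map Prod.snd).sum
      = v + ((l.filter (fun p => !(p.1 == x) && r p)).map Prod.snd).sum := by
  induction l with
  | nil => cases hmem
  | cons p l ih =>
    simp only [List.map_cons, List.nodup_cons] at hnd
    by_cases hk : p.1 = x
    · have hxt : x ∉ l.map Prod.fst := by rw [← hk]; exact hnd.1
      have hp : p = (x, v) := by
        rcases List.mem_cons.mp hmem with h | h
        · exact h.symm
        · exact absurd (List.mem_map.mpr ⟨(x, v), h, rfl⟩) hxt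
      have hfl : ∀ q : (String × Int) → Bool,
          l.filter (fun p' => (p'.1 == x) || q p') = l.filter q := by
        intro q; apply List.filter_congr; intro a ha
        have : a.1 ≠ x := fun h => hxt (List.mem_map.mpr ⟨a, ha, h⟩)
        simp [this]
      have hfl2 : l.filter (fun p' => !(p'.1 == x) && r p') = l.filter r := by
        apply List.filter_congr; intro a ha
        have : a.1 ≠ x := fun h => hxt (List.mem_map.mpr ⟨a, ha, h⟩)
        simp [this]
      subst hp
      simp [hfl, hfl2]
    · have hmem' : (x, v) ∈ l := by
        rcases List.mem_cons.mp hmem with h | h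
        · exact absurd (congrArg Prod.fst h.symm) hk
        · exact h
      have := ih hnd.2 hmem'
      by_cases hr : r p = true
      · simp [hk, hr, this]; ring
      · simp at hr; simp [hk, hr, this]

-- A's pop loop: state after the loop, characterised by a filter over d.items
theorem pvA_loop (new_id : String) (rest : List String) :
    ∀ (d : PySem.Dict String Int) (t : Int), d.keys.Nodup →
    rest.foldl (fun (st : PySem.Dict String Int × Int) old_id =>
      if old_id = new_id then st
      else
        match st.1.pop? old_id with
        | some r => (r.2, st.2 + r.1)
        | none => (st.1, st.2 + 0)) (d, t)
    = (PySem.Dict.mk (d.items.filter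
          (fun p => !(decide (p.1 ∈ rest) && decide (p.1 ≠ new_id)))),
       t + ((d.items.filter
          (fun p => decide (p.1 ∈ rest) && decide (p.1 ≠ new_id))).map Prod.snd).sum) := by
  induction rest with
  | nil =>
    intro d t _
    simp [List.filter_true]
  | cons x rest ih =>
    intro d t hnd
    rw [List.foldl_cons]
    by_cases hx : x = new_id
    · subst hx
      rw [if_pos rfl, ih d t hnd]
      have h1 : d.items.filter (fun p => decide (p.1 ∈ x :: rest) && decide (p.1 ≠ x))
          = d.items.filter (fun p => decide (p.1 ∈ rest) && decide (p.1 ≠ x)) := by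
        apply List.filter_congr; intro a _
        by_cases ha : a.1 = x <;> simp [ha, List.mem_cons]
      have h2 : d.items.filter (fun p => !(decide (p.1 ∈ x :: rest) && decide (p.1 ≠ x)))
          = d.items.filter (fun p => !(decide (p.1 ∈ rest) && decide (p.1 ≠ x))) := by
        apply List.filter_congr; intro a _
        by_cases ha : a.1 = x <;> simp [ha, List.mem_cons]
      rw [h1, h2]
    · rw [if_neg hx]
      cases hg : (d.get? x : Option Int) with
      | none =>
        have hnk : x ∉ d.keys :=
          (PySem.Dict.get?_eq_none_iff_not_mem_keys (d := d) (k := x)).mp hg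
        have hpop : d.pop? x = none := by simp [PySem.Dict.pop?, hg]
        rw [hpop]
        show List.foldl _ (d, t + 0) rest = _
        rw [ih d (t + 0) hnd]
        have hmem : ∀ a ∈ d.items, a.1 ≠ x := by
          intro a ha h
          exact hnk (h ▸ List.mem_map.mpr ⟨a, ha, rfl⟩)
        have h1 : d.items.filter (fun p => decide (p.1 ∈ x :: rest) && decide (p.1 ≠ new_id))
            = d.items.filter (fun p => decide (p.1 ∈ rest) && decide (p.1 ≠ new_id)) := by
          apply List.filter_congr; intro a ha
          simp [List.mem_cons, hmem a ha]
        have h2 : d.items.filter (fun p => !(decide (p.1 ∈ x :: rest) && decide (p.1 ≠ new_id)))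
            = d.items.filter (fun p => !(decide (p.1 ∈ rest) && decide (p.1 ≠ new_id))) := by
          apply List.filter_congr; intro a ha
          simp [List.mem_cons, hmem a ha]
        rw [add_zero, h1, h2]
      | some v =>
        have hpop : d.pop? x = some (v, d.erase x) := by simp [PySem.Dict.pop?, hg]
        rw [hpop]
        have herase_items : (d.erase x).items = d.items.filter (fun p => !(p.1 == x)) := rfl
        have hnd' : (d.erase x).keys.Nodup := by
          have : (d.erase x).keys.Sublist d.keys := by
            simp only [PySem.Dict.keys, herase_items]
            exact List.Sublist.map _ List.filter_sublist
          exact hnd.sublist this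
        show List.foldl _ (d.erase x, t + v) rest = _
        rw [ih (d.erase x) (t + v) hnd']
        have hmemd : (x, v) ∈ d.items := PySem.Dict.mem_items_of_get?_eq_some d hg
        simp only [Prod.mk.injEq]
        refine ⟨?_, ?_⟩
        · apply PySem.Dict.ext
          show ((d.erase x).items.filter _) = _
          rw [herase_items, List.filter_filter]
          apply List.filter_congr; intro a _
          by_cases hax : a.1 = x
          · simp [hax, hx, List.mem_cons]
          · simp [hax, List.mem_cons]
        · have hsum := pv_sum_filter_or d.items x v
            (fun p => decide (p.1 ∈ rest) && decide (p.1 ≠ new_id)) hnd hmemd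
          have hl : d.items.filter (fun p => decide (p.1 ∈ x :: rest) && decide (p.1 ≠ new_id))
              = d.items.filter (fun p => (p.1 == x) || (decide (p.1 ∈ rest) && decide (p.1 ≠ new_id))) := by
            apply List.filter_congr; intro a _
            by_cases hax : a.1 = x
            · simp [hax, hx, List.mem_cons]
            · simp [hax, List.mem_cons]
          have hr : (d.erase x).items.filter (fun p => decide (p.1 ∈ rest) && decide (p.1 ≠ new_id))
              = d.items.filter (fun p => !(p.1 == x) && (decide (p.1 ∈ rest) && decide (p.1 ≠ new_id))) := by
            rw [herase_items, List.filter_filter]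
            apply List.filter_congr; intro a _
            cases h1 : (a.1 == x) <;> cases h2 : decide (a.1 ∈ rest) <;>
              cases h3 : decide (a.1 ≠ new_id) <;> rfl
          rw [hl, hsum, hr]
          ring

-- the set B builds tests exactly A's pop condition
theorem pv_contains_diff (xs : List String) (y k : String) :
    (PySem.Set.diff (PySem.Set.ofList xs) (PySem.Set.ofList [y])).contains k
      = (decide (k ∈ xs) && decide (k ≠ y)) := by
  simp only [PySem.Set.diff, PySem.Set.contains, List.contains_eq_mem, List.mem_filter]
  by_cases h1 : k ∈ xs
  · by_cases h2 : k = y <;>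
      simp [h1, h2, PySem.Set.mem_ofList]
  · simp [h1, PySem.Set.mem_ofList]

-- ===== VERDICT (by name: the statement is the Claim_ definition above) =====
theorem remap_entry_ids_spec : Claim_equal_remap_entry_ids := by
  intro entries old_ids new_id _
  unfold Spec_remap_entry_ids remap_entry_ids remap_entry_ids_alt
  have hnd0 : ((PySem.Dict.ofList entries).items.map Prod.fst).Nodup :=
    PySem.Dict.nodup_keys_ofList entries
  set items := (PySem.Dict.ofList entries).items with hitems
  have hqeq : ∀ p : String × Int,
      (PySem.Set.diff (PySem.Set.ofList old_ids) (PySem.Set.ofList [new_id])).contains p.1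
        = (decide (p.1 ∈ old_ids) && decide (p.1 ≠ new_id)) := fun p =>
    pv_contains_diff old_ids new_id p.1
  by_cases hnil : old_ids = []
  · subst hnil
    rw [if_pos rfl]
    simp only [hqeq]
    simp
  · rw [if_neg hnil]
    rw [pvA_loop new_id old_ids (PySem.Dict.ofList entries) 0
          (PySem.Dict.nodup_keys_ofList entries)]
    simp only [hqeq]
    set cond : (String × Int) → Bool := fun p => decide (p.1 ∈ old_ids) && decide (p.1 ≠ new_id) with hcond
    set kept := items.filter (fun p => !cond p) with hk
    set T := ((items.filter cond).map Prod.snd).sum with hT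
    have hndk : (kept.map Prod.fst).Nodup := by
      have : (kept.map Prod.fst).Sublist (items.map Prod.fst) :=
        List.Sublist.map _ List.filter_sublist
      exact hnd0.sublist this
    have hkeys : (PySem.Dict.mk kept).keys = kept.map Prod.fst := rfl
    have hcontains : (PySem.Dict.mk kept).contains new_id
        = kept.any (fun p => p.1 == new_id) := by
      rw [PySem.Dict.contains_eq_decide_mem_keys, hkeys]
      rcases h : kept.any (fun p => p.1 == new_id) with _ | _
      · simp only [List.any_eq_false] at h
        have : new_id ∉ kept.map Prod.fst := by
          intro hm
          rcases List.mem_map.mp hm with ⟨a, ha, hf⟩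
          exact absurd hf (by simpa using h a ha)
        simp [this]
      · simp only [List.any_eq_true] at h
        rcases h with ⟨a, ha, hf⟩
        have : new_id ∈ kept.map Prod.fst :=
          List.mem_map.mpr ⟨a, ha, by simpa using hf⟩
        simp [this]
    by_cases hT0 : T = 0
    · rw [if_neg (by simp [hT0]), if_pos hT0]
    · rw [if_pos (by simpa [zero_add] using hT0), if_neg hT0]
      rw [zero_add]
      cases hc : kept.any (fun p => p.1 == new_id) with
      | false =>
        rw [if_neg Bool.false_ne_true]
        have hnc : (PySem.Dict.mk kept).contains new_id = false := by rw [hcontains, hc]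
        rw [PySem.Dict.items_insert_of_not_contains _ _ hnc,
            PySem.Dict.getD_of_not_contains _ 0 hnc, zero_add]
      | true =>
        rw [if_pos rfl]
        simp only [List.any_eq_true] at hc
        rcases hc with ⟨a, ha, haf⟩
        have haf' : a.1 = new_id := by simpa using haf
        have hmemk : (new_id, a.2) ∈ (PySem.Dict.mk kept).items := by
          show (new_id, a.2) ∈ kept
          have : a = (new_id, a.2) := by
            cases a; simp at haf' ⊢; exact haf'
          rwa [← this]
        have hget : (PySem.Dict.mk kept).getD new_id 0 = a.2 :=
          PySem.Dict.getD_of_mem_items _ hmemk hndk 0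
        have hcT : (PySem.Dict.mk kept).contains new_id = true := by
          rw [hcontains]; exact List.any_eq_true.mpr ⟨a, ha, haf⟩
        rw [PySem.Dict.items_insert_of_contains _ _ hcT, hget]
        show kept.map _ = kept.map _
        apply List.map_congr_left
        intro b hb
        by_cases hbf : b.1 = new_id
        · have hb2 : b.2 = a.2 := by
            have h1 : (b.1, b.2) ∈ kept := by simpa using hb
            have h2 : (new_id, a.2) ∈ kept := hmemk
            rw [hbf] at h1
            -- nodup keys: two items with key new_id coincide
            have := List.inj_on_of_nodup_map hndk h1 h2 (by rfl)
            simpa using this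
          simp [hbf, hb2]
        · simp [hbf]
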